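-- pv_equiv track=rewrite | github.com/chakirach94/ormvag1 | excel_export.py | build_provenance_string
-- ===== SOURCE A (Python) =====
-- from collections import defaultdict
--
-- def build_provenance_string(works):
--     """
--     Construit la chaîne de provenance CPS pour un groupe de travaux.
--
--     Règles :
--       - Regrouper par marché (reference)
--       - Séries : dédupliquées, triées numériquement (sinon alphabétique), jointes par '-'
--       - Marchés : triés alphabétiquement, joints par '; '
--
--     Exemple : "M13/23: 40-64-122; M11/22: 95-101-102"
--
--     Args:
--         works: list[dict] – chaque dict contient 'marche' et 'serie'.
--
--     Returns:
--         str – chaîne de provenance formatée.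
--     """
--     marche_series = defaultdict(set)
--
--     for w in works:
--         ref   = (w.get("marche") or "").strip()
--         serie = str(w.get("serie") or "").strip()
--         if not ref:
--             continue
--         if serie:
--             marche_series[ref].add(serie)
--         else:
--             # garder le marché même sans série
--             marche_series.setdefault(ref, set())
--
--     if not marche_series:
--         return ""
--
--     parts = []
--     for ref in sorted(marche_series.keys()):
--         series = marche_series[ref]
--         if series:
--             def _key(s):
--                 try:    return (0, int(s))
--                 except: return (1, s)
--             sorted_s = sorted(series, key=_key)
--             parts.append(f"{ref}: {'-'.join(sorted_s)}")
--         else: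
--             parts.append(ref)
--
--     return "; ".join(parts)
-- ===== SOURCE B (Python) =====
-- def build_provenance_string(works):
--     def _key(s):
--         try:    return (0, int(s))
--         except: return (1, s)
--
--     # Normalize once into deduplicated (ref, serie) pairs (serie may be empty).
--     seen = set()
--     pairs = []
--     for w in works:
--         ref = (w.get("marche") or "").strip()
--         serie = str(w.get("serie") or "").strip()
--         if ref and (ref, serie) not in seen:
--             seen.add((ref, serie))
--             pairs.append((ref, serie))
--
--     # One global sort: by market, then by the serie's numeric/alpha key, then the serie itself.
--     pairs.sort(key=lambda p: (p[0], _key(p[1]), p[1]))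
--
--     # Single pass over the sorted pairs, starting a new group whenever the market changes.
--     parts = []
--     cur_ref = None
--     cur_series = []
--     for ref, serie in pairs:
--         if ref != cur_ref:
--             if cur_ref is not None:
--                 parts.append(f"{cur_ref}: {'-'.join(cur_series)}" if cur_series else cur_ref)
--             cur_ref = ref
--             cur_series = []
--         if serie:
--             cur_series.append(serie)
--     if cur_ref is not None:
--         parts.append(f"{cur_ref}: {'-'.join(cur_series)}" if cur_series else cur_ref)
--
--     return "; ".join(parts)
-- ===== Notes on version B (the rewrite author's own statement) =====
-- stated objective: alternative
-- what changed: Replaces A's defaultdict-of-sets grouping with per-market sorts by a different decomposition: normalize each work to a (ref, serie) pair, dedupe with a seen-set, do ONE global sort by (ref, serie-key, serie), then build all parts in a single grouping scan over the sorted pairs.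
import Mathlib
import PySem

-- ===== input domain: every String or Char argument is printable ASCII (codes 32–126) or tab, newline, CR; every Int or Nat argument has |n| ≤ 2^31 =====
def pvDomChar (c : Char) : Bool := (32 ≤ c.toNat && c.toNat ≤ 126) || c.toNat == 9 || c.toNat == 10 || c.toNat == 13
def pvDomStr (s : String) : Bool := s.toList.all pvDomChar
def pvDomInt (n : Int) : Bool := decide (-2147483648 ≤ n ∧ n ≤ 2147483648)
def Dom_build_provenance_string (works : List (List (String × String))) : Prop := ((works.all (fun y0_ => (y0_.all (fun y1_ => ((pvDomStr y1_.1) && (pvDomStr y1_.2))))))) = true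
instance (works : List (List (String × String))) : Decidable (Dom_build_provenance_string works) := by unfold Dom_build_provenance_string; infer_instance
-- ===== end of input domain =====

-- B replaces A's defaultdict-of-sets plus per-market sorts by one normalize → dedupe → single
-- global sort by (market, serie-key, serie) → one linear grouping scan (objective: alternative
-- decomposition, same asymptotic cost).

-- ===== PORT A =====
-- the `_key` closure both Pythons define: (0, int(s)) if s parses as an int, else (1, s);
-- modelled order-faithfully as a lexicographic sum (every Sum.inl < every Sum.inr)
def pvKey (s : String) : Lex (Int ⊕ String) :=
  match PySem.Int.ofStr? s with
  | some n => toLex (Sum.inl n)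
  | none   => toLex (Sum.inr s)

-- body of A's first loop: one `for w in works` step updating the defaultdict(set)
def pvAStep (d : PySem.Dict String (PySem.Set String)) (w : List (String × String)) :
    PySem.Dict String (PySem.Set String) :=
  let ref := PySem.Str.strip ((PySem.Dict.mk w).getD "marche" "")
  let serie := PySem.Str.strip ((PySem.Dict.mk w).getD "serie" "")
  if ref = "" then d
  else if serie ≠ "" then
    -- marche_series[ref].add(serie)  (defaultdict: missing key starts from set())
    d.modify ref PySem.Set.empty (fun s => PySem.Set.add s serie)
  else
    -- marche_series.setdefault(ref, set())
    d.setdefault ref PySem.Set.empty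

def build_provenance_string (works : List (List (String × String))) : String :=
  let d := works.foldl pvAStep PySem.Dict.empty
  if d.items = [] then ""
  else
    PySem.Str.join "; "
      ((PySem.List.sorted d.keys (fun k => k) false).foldl (fun parts ref =>
        let series := d.getD ref PySem.Set.empty
        if series ≠ [] then
          parts ++ [ref ++ ": " ++ PySem.Str.join "-" (PySem.List.sorted series pvKey false)]
        else parts ++ [ref]) [])

-- ===== PORT B =====
-- normalized (ref, serie) of one work dict
def pvNorm (w : List (String × String)) : String × String :=
  (PySem.Str.strip ((PySem.Dict.mk w).getD "marche" ""),
   PySem.Str.strip ((PySem.Dict.mk w).getD "serie" ""))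

-- B's single sort key: (ref, _key(serie), serie), lexicographic
def pvBigKey (p : String × String) : Lex (String × Lex (Lex (Int ⊕ String) × String)) :=
  toLex (p.1, toLex (pvKey p.2, p.2))

-- f"{ref}: {'-'.join(cur_series)}" if cur_series else ref
def pvEmit (r : String) (sers : List String) : String :=
  if sers ≠ [] then r ++ ": " ++ PySem.Str.join "-" sers else r

-- body of B's first loop: dedupe the normalized pairs with a seen-set
def pvCollect (st : PySem.Set (String × String) × List (String × String))
    (w : List (String × String)) : PySem.Set (String × String) × List (String × String) :=
  let p := pvNorm w
  if p.1 ≠ "" ∧ ¬ (PySem.Set.contains st.1 p = true) then (PySem.Set.add st.1 p, st.2 ++ [p])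
  else st

-- body of B's grouping scan: state = (parts, cur_ref, cur_series)
def pvScanStep (st : List String × Option String × List String) (p : String × String) :
    List String × Option String × List String :=
  let st' :=
    if st.2.1 ≠ some p.1 then
      match st.2.1 with
      | none => (st.1, some p.1, ([] : List String))
      | some r => (st.1 ++ [pvEmit r st.2.2], some p.1, ([] : List String))
    else st
  if p.2 ≠ "" then (st'.1, st'.2.1, st'.2.2 ++ [p.2]) else st'

-- the trailing `if cur_ref is not None: parts.append(...)`
def pvFinish (st : List String × Option String × List String) : List String :=
  match st.2.1 with
  | none => st.1
  | some r => st.1 ++ [pvEmit r st.2.2]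

def build_provenance_string_alt (works : List (List (String × String))) : String :=
  let st := works.foldl pvCollect (PySem.Set.empty, [])
  let pairs := PySem.List.sorted st.2 pvBigKey false
  PySem.Str.join "; " (pvFinish (pairs.foldl pvScanStep ([], none, [])))

-- ===== PRECONDITION & SPEC =====
-- Pre_ excludes inputs where one market carries two DISTINCT serie strings with the same numeric
-- key (e.g. '7' and '07'): there A sorts a Python set with a non-injective key, so its order of
-- those tied series is an accident of set-iteration order and no particular order is specifiable.
def Pre_build_provenance_string (works : List (List (String × String))) : Prop :=
  ∀ w ∈ works, ∀ w' ∈ works,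
    (pvNorm w).1 ≠ "" → (pvNorm w).1 = (pvNorm w').1 →
    pvKey (pvNorm w).2 = pvKey (pvNorm w').2 → (pvNorm w).2 = (pvNorm w').2
instance (works : List (List (String × String))) : Decidable (Pre_build_provenance_string works) := by
  unfold Pre_build_provenance_string; infer_instance

def pvWitness_build_provenance_string : (List (List (String × String))) :=
  [[("marche", "M13/23"), ("serie", "40")], [("marche", "M13/23"), ("serie", "64")],
   [("marche", "M11/22"), ("serie", "")]]

def Spec_build_provenance_string (works : List (List (String × String))) (out : String) : Prop := out = build_provenance_string_alt works
instance (works : List (List (String × String))) (out : String) : Decidable (Spec_build_provenance_string works out) := by unfold Spec_build_provenance_string; infer_instance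

-- ===== CLAIM (what is proved, stated in full; the proofs are below) =====
def Claim_equal_build_provenance_string : Prop := ∀ (works : List (List (String × String))), Dom_build_provenance_string works → Pre_build_provenance_string works → Spec_build_provenance_string works (build_provenance_string works)

-- ===== LEMMAS AND PROOFS =====

-- spec-level views of the input (proof-only)
def pairsOf (works : List (List (String × String))) : List (String × String) :=
  (works.map pvNorm).filter (fun p => p.1 ≠ "")
def refsOf (works : List (List (String × String))) : List String := (pairsOf works).map Prod.fst
def sersOf (works : List (List (String × String))) (r : String) : List String :=
  ((pairsOf works).filter (fun p => p.1 = r)).map Prod.snd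
def key2 (s : String) : Lex (Lex (Int ⊕ String) × String) := toLex (pvKey s, s)
def grpOf (works : List (List (String × String))) (r : String) : List String :=
  PySem.List.sorted (PySem.Set.ofList (sersOf works r)) key2 false
def sortedRefsOf (works : List (List (String × String))) : List String :=
  PySem.List.sorted (PySem.Set.ofList (refsOf works)) (fun k => k) false
def emitOf (works : List (List (String × String))) (r : String) : String :=
  pvEmit r ((grpOf works r).filter (fun s => s ≠ ""))
def partA (works : List (List (String × String))) (r : String) : String :=
  if PySem.Set.ofList ((sersOf works r).filter (fun s => s ≠ "")) ≠ [] then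
    r ++ ": " ++ PySem.Str.join "-"
      (PySem.List.sorted (PySem.Set.ofList ((sersOf works r).filter (fun s => s ≠ ""))) pvKey false)
  else r

-- ---- A-side characterization ----
lemma sersOf_cons (w : List (String × String)) (ws : List (List (String × String))) (r : String) :
    sersOf (w :: ws) r =
      if (pvNorm w).1 = "" then sersOf ws r
      else if (pvNorm w).1 = r then (pvNorm w).2 :: sersOf ws r else sersOf ws r := by
  by_cases h1 : (pvNorm w).1 = ""
  · simp [sersOf, pairsOf, h1]
  · by_cases h2 : (pvNorm w).1 = r
    · have hr : ¬ r = "" := h2 ▸ h1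
      simp [sersOf, pairsOf, h2, hr]
    · simp [sersOf, pairsOf, h1, h2]

lemma refsOf_cons (w : List (String × String)) (ws : List (List (String × String))) :
    refsOf (w :: ws) =
      if (pvNorm w).1 = "" then refsOf ws else (pvNorm w).1 :: refsOf ws := by
  by_cases h1 : (pvNorm w).1 = "" <;> simp [refsOf, pairsOf, h1]

lemma pvAStep_eq (d : PySem.Dict String (PySem.Set String)) (w : List (String × String)) :
    pvAStep d w =
      if (pvNorm w).1 = "" then d
      else if (pvNorm w).2 ≠ "" then
        d.modify (pvNorm w).1 PySem.Set.empty (fun s => PySem.Set.add s (pvNorm w).2)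
      else d.setdefault (pvNorm w).1 PySem.Set.empty := rfl
lemma A_getD (works : List (List (String × String))) (d : PySem.Dict String (PySem.Set String))
    (r : String) :
    (works.foldl pvAStep d).getD r PySem.Set.empty =
      PySem.Set.update (d.getD r PySem.Set.empty) ((sersOf works r).filter (fun s => s ≠ "")) := by
  induction works generalizing d with
  | nil => simp [sersOf, pairsOf, PySem.Set.update]
  | cons w ws ih =>
    rw [List.foldl_cons, pvAStep_eq, sersOf_cons]
    by_cases h1 : (pvNorm w).1 = ""
    · rw [if_pos h1, if_pos h1, ih]
    · rw [if_neg h1, if_neg h1]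
      by_cases h2 : (pvNorm w).2 = ""
      · rw [if_neg (by simpa using h2), ih]
        have hgetD : ∀ x, (d.setdefault (pvNorm w).1 PySem.Set.empty).getD x PySem.Set.empty =
            d.getD x PySem.Set.empty := by
          intro x
          by_cases hx : x = (pvNorm w).1
          · rw [hx]; exact PySem.Dict.getD_setdefault_self d _ _ _
          · rw [PySem.Dict.getD_eq_get?_getD, PySem.Dict.get?_setdefault_of_ne d _ hx,
              ← PySem.Dict.getD_eq_get?_getD]
        rw [hgetD]
        by_cases h3 : (pvNorm w).1 = r
        · rw [if_pos h3]
          simp [h2]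
        · rw [if_neg h3]
      · rw [if_pos (by simpa using h2), ih, PySem.Dict.getD_modify]
        by_cases h3 : (pvNorm w).1 = r
        · rw [if_pos h3, if_pos h3.symm]
          have : ((pvNorm w).2 :: sersOf ws r).filter (fun s => s ≠ "") =
              (pvNorm w).2 :: (sersOf ws r).filter (fun s => s ≠ "") := by
            simp [h2]
          rw [this, h3]
          simp [PySem.Set.update]
        · rw [if_neg h3, if_neg (fun he => h3 he.symm)]

lemma A_keys (works : List (List (String × String))) (d : PySem.Dict String (PySem.Set String)) :
    (works.foldl pvAStep d).keys = PySem.Set.update d.keys (refsOf works) := by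
  induction works generalizing d with
  | nil => simp [refsOf, pairsOf, PySem.Set.update]
  | cons w ws ih =>
    rw [List.foldl_cons, pvAStep_eq, refsOf_cons]
    by_cases h1 : (pvNorm w).1 = ""
    · rw [if_pos h1, if_pos h1, ih]
    · rw [if_neg h1, if_neg h1]
      have hupd : PySem.Set.update d.keys ((pvNorm w).1 :: refsOf ws) =
          PySem.Set.update (PySem.Set.add d.keys (pvNorm w).1) (refsOf ws) := by
        simp [PySem.Set.update]
      by_cases hm : (pvNorm w).1 ∈ d.keys
      · have hcon : d.contains (pvNorm w).1 = true := by
          rw [PySem.Dict.contains_eq_decide_mem_keys]; simpa using hm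
        have hadd : PySem.Set.add d.keys (pvNorm w).1 = d.keys := by
          simp [PySem.Set.add, hm]
        by_cases h2 : (pvNorm w).2 = ""
        · rw [if_neg (by simpa using h2), ih, PySem.Dict.keys_setdefault, if_pos hcon,
            hupd, hadd]
        · rw [if_pos (by simpa using h2), ih, PySem.Dict.keys_modify,
            PySem.Dict.keys_insert_of_contains _ _ hcon, hupd, hadd]
      · have hcon : d.contains (pvNorm w).1 = false := by
          rw [PySem.Dict.contains_eq_decide_mem_keys]; simpa using hm
        have hadd : PySem.Set.add d.keys (pvNorm w).1 = d.keys ++ [(pvNorm w).1] := by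
          simp [PySem.Set.add, hm]
        by_cases h2 : (pvNorm w).2 = ""
        · rw [if_neg (by simpa using h2), ih, PySem.Dict.keys_setdefault, if_neg (by simp [hcon]),
            hupd, hadd]
        · rw [if_pos (by simpa using h2), ih, PySem.Dict.keys_modify,
            PySem.Dict.keys_insert_of_not_contains _ _ hcon, hupd, hadd]

lemma A_eq_parts (works : List (List (String × String))) :
    build_provenance_string works =
      if refsOf works = [] then ""
      else PySem.Str.join "; " ((sortedRefsOf works).map (partA works)) := by
  have hkeys : (works.foldl pvAStep PySem.Dict.empty).keys = PySem.Set.ofList (refsOf works) := by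
    rw [A_keys, PySem.Dict.keys_empty, PySem.Set.ofList_eq_foldl]
    rfl
  have hgetD : ∀ r, (works.foldl pvAStep PySem.Dict.empty).getD r PySem.Set.empty =
      PySem.Set.ofList ((sersOf works r).filter (fun s => s ≠ "")) := by
    intro r
    rw [A_getD, PySem.Dict.getD_empty, PySem.Set.ofList_eq_foldl]
    rfl
  unfold build_provenance_string
  by_cases h : refsOf works = []
  · have hofl : PySem.Set.ofList (refsOf works) = [] := by rw [h]; rfl
    have : (works.foldl pvAStep PySem.Dict.empty).items = [] := by
      have := hkeys
      rw [hofl] at this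
      exact List.map_eq_nil_iff.1 this
    simp [this, h]
  · have hitems : (works.foldl pvAStep PySem.Dict.empty).items ≠ [] := by
      intro hit
      apply h
      have : (works.foldl pvAStep PySem.Dict.empty).keys = [] := by
        show (works.foldl pvAStep PySem.Dict.empty).items.map Prod.fst = []
        rw [hit]; rfl
      rw [hkeys] at this
      rcases hr : refsOf works with _ | ⟨x, xs⟩
      · rfl
      · exfalso
        have hx : x ∈ PySem.Set.ofList (refsOf works) := by
          rw [PySem.Set.mem_ofList, hr]; exact List.mem_cons_self
        rw [this] at hx
        exact absurd hx (List.not_mem_nil)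
    rw [if_neg h]
    simp only [hitems, if_false, hkeys]
    congr 1
    rw [show PySem.List.sorted (PySem.Set.ofList (refsOf works)) (fun k => k) false =
      sortedRefsOf works from rfl]
    rw [PySem.List.foldl_congr_mem (sortedRefsOf works) _
      (fun parts ref => parts ++ [partA works ref]) []
      (by
        intro acc x _
        rw [hgetD]
        show _ = acc ++ [partA works x]
        unfold partA
        split_ifs with h1 <;> rfl)]
    rw [PySem.List.foldl_append_singleton_eq_map]
    rfl

-- ---- B-side: collection ----
lemma B_collect (works : List (List (String × String))) (s : PySem.Set (String × String)) :
    works.foldl pvCollect (s, s) =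
      (PySem.Set.update s (pairsOf works), PySem.Set.update s (pairsOf works)) := by
  induction works generalizing s with
  | nil => simp [pairsOf, PySem.Set.update]
  | cons w ws ih =>
    by_cases h1 : (pvNorm w).1 = ""
    · have hb : pvCollect (s, s) w = (s, s) := by simp [pvCollect, h1]
      simp only [List.foldl_cons, hb, ih]
      simp [pairsOf, h1]
    · have hp : pairsOf (w :: ws) = pvNorm w :: pairsOf ws := by simp [pairsOf, h1]
      by_cases h2 : pvNorm w ∈ s
      · have hb : pvCollect (s, s) w = (s, s) := by simp [pvCollect, h2]
        have ha : PySem.Set.add s (pvNorm w) = s := by simp [PySem.Set.add, h2]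
        simp only [List.foldl_cons, hb, ih, hp, PySem.Set.update, List.foldl_cons, ha]
      · have ha : PySem.Set.add s (pvNorm w) = s ++ [pvNorm w] := by simp [PySem.Set.add, h2]
        have hb : pvCollect (s, s) w = (s ++ [pvNorm w], s ++ [pvNorm w]) := by
          simp [pvCollect, h1, h2]
        simp only [List.foldl_cons, hb, ih, hp, PySem.Set.update, List.foldl_cons, ha]

-- ---- membership bookkeeping ----
lemma mem_pairsOf (works : List (List (String × String))) (a b : String) :
    (a, b) ∈ pairsOf works ↔ a ∈ refsOf works ∧ b ∈ sersOf works a := by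
  constructor
  · intro h
    refine ⟨List.mem_map.2 ⟨(a, b), h, rfl⟩, ?_⟩
    exact List.mem_map.2 ⟨(a, b), List.mem_filter.2 ⟨h, by simp⟩, rfl⟩
  · rintro ⟨-, hb⟩
    rcases List.mem_map.1 hb with ⟨p, hp, rfl⟩
    rcases List.mem_filter.1 hp with ⟨hp1, hp2⟩
    have h1 : p.1 = a := by simpa using hp2
    have : p = (a, p.2) := by cases p; simp_all
    rwa [this] at hp1

lemma refsOf_ne_empty (works : List (List (String × String))) (r : String)
    (h : r ∈ refsOf works) : r ≠ "" := by
  rcases List.mem_map.1 h with ⟨p, hp, rfl⟩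
  rcases List.mem_filter.1 hp with ⟨-, hp2⟩
  simpa using hp2

lemma sersOf_exists_work (works : List (List (String × String))) (r s : String)
    (h : s ∈ sersOf works r) : ∃ w ∈ works, pvNorm w = (r, s) := by
  rcases List.mem_map.1 h with ⟨p, hp, rfl⟩
  rcases List.mem_filter.1 hp with ⟨hp1, hp2⟩
  have h1 : p.1 = r := by simpa using hp2
  rcases List.mem_filter.1 hp1 with ⟨hm, -⟩
  rcases List.mem_map.1 hm with ⟨w, hw, hwp⟩
  exact ⟨w, hw, by rw [hwp]; cases p; simp_all⟩

lemma grp_nodup (works : List (List (String × String))) (r : String) :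
    (grpOf works r).Nodup := by
  unfold grpOf
  exact (PySem.List.sorted_perm _ _ _).symm.nodup (PySem.Set.nodup_ofList _)

lemma grp_pairwise (works : List (List (String × String))) (r : String) :
    (grpOf works r).Pairwise (fun a b => key2 a < key2 b) := by
  have hle := PySem.List.sorted_pairwise (PySem.Set.ofList (sersOf works r)) key2
  have hnd : (grpOf works r).Pairwise (fun a b => a ≠ b) := grp_nodup works r
  exact (hle.and hnd).imp (fun h => lt_of_le_of_ne h.1 (fun he => h.2 (by
    have := congrArg ofLex he
    simp only [key2, ofLex_toLex, Prod.mk.injEq] at this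
    exact this.2)))

lemma grp_ne_nil (works : List (List (String × String))) (r : String)
    (h : r ∈ refsOf works) : grpOf works r ≠ [] := by
  rcases List.mem_map.1 h with ⟨p, hp, rfl⟩
  have hs : p.2 ∈ sersOf works p.1 := (mem_pairsOf works p.1 p.2).1 (by simpa using hp) |>.2
  unfold grpOf
  intro hnil
  rw [PySem.List.sorted_eq_nil_iff] at hnil
  exact (List.ne_nil_of_mem ((PySem.Set.mem_ofList _ _).2 hs)) hnil

-- ---- the one global sort = concatenation of per-market groups ----
lemma pairwise_flatMap' {α β : Type} {R : β → β → Prop} (f : α → List β) (l : List α)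
    (h1 : ∀ a ∈ l, (f a).Pairwise R)
    (h2 : l.Pairwise (fun a b => ∀ x ∈ f a, ∀ y ∈ f b, R x y)) :
    (l.flatMap f).Pairwise R := by
  induction l with
  | nil => simp
  | cons a l ih =>
    rw [List.flatMap_cons, List.pairwise_append]
    rcases hpc : h2 with _ | ⟨hab, htl⟩
    refine ⟨h1 a List.mem_cons_self, ih (fun b hb => h1 b (List.mem_cons_of_mem _ hb)) htl, ?_⟩
    intro x hx y hy
    rcases List.mem_flatMap.1 hy with ⟨b, hb, hyb⟩
    exact hab b hb x hx y hyb

lemma sort_flat (works : List (List (String × String))) :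
    PySem.List.sorted (PySem.Set.ofList (pairsOf works)) pvBigKey false =
      (sortedRefsOf works).flatMap (fun r => (grpOf works r).map (fun s => (r, s))) := by
  have hflatpw : ((sortedRefsOf works).flatMap
      (fun r => (grpOf works r).map (fun s => (r, s)))).Pairwise
      (fun x y => pvBigKey x < pvBigKey y) := by
    apply pairwise_flatMap'
    · intro r _
      rw [List.pairwise_map]
      refine (grp_pairwise works r).imp (fun h => ?_)
      rw [pvBigKey, pvBigKey, Prod.Lex.lt_iff]
      right
      exact ⟨rfl, h⟩
    · have hpw : (sortedRefsOf works).Pairwise (fun a b => a < b) :=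
        PySem.List.sorted_ofList_pairwise_lt _
      refine hpw.imp (fun hab x hx y hy => ?_)
      rcases List.mem_map.1 hx with ⟨s, -, rfl⟩
      rcases List.mem_map.1 hy with ⟨t, -, rfl⟩
      rw [pvBigKey, pvBigKey, Prod.Lex.lt_iff]
      left
      exact hab
  have hne : ((sortedRefsOf works).flatMap
      (fun r => (grpOf works r).map (fun s => (r, s)))).Pairwise (fun x y => x ≠ y) :=
    hflatpw.imp (fun h => by intro he; rw [he] at h; exact lt_irrefl _ h)
  apply PySem.List.sorted_eq_of_perm_of_pairwise_lt _ _ pvBigKey _ hflatpw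
  rw [List.perm_ext_iff_of_nodup hne (PySem.Set.nodup_ofList _)]
  rintro ⟨a, b⟩
  rw [PySem.Set.mem_ofList, List.mem_flatMap, mem_pairsOf]
  constructor
  · rintro ⟨r, hr, hab⟩
    rcases List.mem_map.1 hab with ⟨s, hs, he⟩
    cases he
    refine ⟨?_, ?_⟩
    · have := (PySem.List.mem_sorted _ _ _ a).1 hr
      rwa [PySem.Set.mem_ofList] at this
    · have := (PySem.List.mem_sorted _ _ _ b).1 hs
      rwa [PySem.Set.mem_ofList] at this
  · rintro ⟨ha, hb⟩
    refine ⟨a, ?_, List.mem_map.2 ⟨b, ?_, rfl⟩⟩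
    · rw [sortedRefsOf, PySem.List.mem_sorted, PySem.Set.mem_ofList]; exact ha
    · rw [grpOf, PySem.List.mem_sorted, PySem.Set.mem_ofList]; exact hb

-- ---- under Pre_, B's per-group series agree with A's per-market sorted set ----
lemma grp_filter_eq (works : List (List (String × String)))
    (hpre : Pre_build_provenance_string works) (r : String) (hr : r ∈ refsOf works) :
    (grpOf works r).filter (fun s => s ≠ "") =
      PySem.List.sorted (PySem.Set.ofList ((sersOf works r).filter (fun s => s ≠ ""))) pvKey false := by
  refine (PySem.List.sorted_eq_of_perm_of_pairwise_lt _ _ pvKey ?_ ?_).symm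
  · rw [List.perm_ext_iff_of_nodup ((grp_nodup works r).filter _) (PySem.Set.nodup_ofList _)]
    intro s
    rw [List.mem_filter, PySem.Set.mem_ofList, List.mem_filter]
    constructor
    · rintro ⟨hm, hne⟩
      refine ⟨?_, hne⟩
      have := (PySem.List.mem_sorted _ _ _ s).1 hm
      rwa [PySem.Set.mem_ofList] at this
    · rintro ⟨hm, hne⟩
      refine ⟨?_, hne⟩
      rw [grpOf, PySem.List.mem_sorted, PySem.Set.mem_ofList]
      exact hm
  · have hr' : r ≠ "" := refsOf_ne_empty works r hr
    refine ((grp_pairwise works r).filter (fun s => decide (s ≠ ""))).imp_of_mem ?_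
    intro a b ha hb hlt
    have hma : a ∈ sersOf works r := by
      have := (List.mem_filter.1 ha).1
      have := (PySem.List.mem_sorted _ _ _ a).1 this
      rwa [PySem.Set.mem_ofList] at this
    have hmb : b ∈ sersOf works r := by
      have := (List.mem_filter.1 hb).1
      have := (PySem.List.mem_sorted _ _ _ b).1 this
      rwa [PySem.Set.mem_ofList] at this
    rw [key2, key2, Prod.Lex.lt_iff] at hlt
    simp only [ofLex_toLex] at hlt
    rcases hlt with hlt | ⟨heq, hab⟩
    · exact hlt
    · exfalso
      rcases sersOf_exists_work works r a hma with ⟨w, hw, hwa⟩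
      rcases sersOf_exists_work works r b hmb with ⟨w', hw', hwb⟩
      have := hpre w hw w' hw' (by rw [hwa]; exact hr') (by rw [hwa, hwb])
        (by rw [hwa, hwb]; exact heq)
      rw [hwa, hwb] at this
      simp only at this
      rw [this] at hab
      exact lt_irrefl _ hab

lemma emit_eq_partA (works : List (List (String × String)))
    (hpre : Pre_build_provenance_string works) (r : String) (hr : r ∈ refsOf works) :
    emitOf works r = partA works r := by
  unfold emitOf partA pvEmit
  rw [grp_filter_eq works hpre r hr]
  simp [PySem.List.sorted_eq_nil_iff]

-- ---- the grouping scan over the concatenated groups ----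
lemma scan_within (t : List String) (r : String) (parts : List String) (cur : List String) :
    (t.map (fun s => (r, s))).foldl pvScanStep (parts, some r, cur) =
      (parts, some r, cur ++ t.filter (fun s => s ≠ "")) := by
  induction t generalizing cur with
  | nil => simp
  | cons s t ih =>
    by_cases hs : s = ""
    · subst hs
      simp only [List.map_cons, List.foldl_cons, pvScanStep]
      simp [ih]
    · simp only [List.map_cons, List.foldl_cons, pvScanStep]
      simp [hs, ih]

lemma scan_group (r : String) (sers : List String) (parts : List String) (p0 : Option String)
    (cur : List String) (hne : p0 ≠ some r) (hs : sers ≠ []) :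
    ((sers.map (fun s => (r, s))).foldl pvScanStep (parts, p0, cur)) =
      (pvFinish (parts, p0, cur), some r, sers.filter (fun s => s ≠ "")) := by
  rcases sers with _ | ⟨s, t⟩
  · exact absurd rfl hs
  simp only [List.map_cons, List.foldl_cons]
  have hstep : pvScanStep (parts, p0, cur) (r, s) =
      (pvFinish (parts, p0, cur), some r, if s ≠ "" then [s] else []) := by
    rcases p0 with _ | r0 <;> by_cases hs' : s = "" <;>
      simp [pvScanStep, pvFinish, hne, hs']
  rw [hstep]
  by_cases hs' : s = ""
  · simp [hs', scan_within]
  · simp [hs', scan_within]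

lemma scan_groups (works : List (List (String × String))) (rs : List String)
    (hpw : rs.Pairwise (fun a b => a ≠ b)) (hne : ∀ r ∈ rs, grpOf works r ≠ [])
    (parts : List String) (p0 : Option String) (cur : List String)
    (h0 : ∀ r ∈ rs, p0 ≠ some r) :
    pvFinish ((rs.flatMap (fun r => (grpOf works r).map (fun s => (r, s)))).foldl pvScanStep
        (parts, p0, cur)) =
      pvFinish (parts, p0, cur) ++ rs.map (emitOf works) := by
  induction rs generalizing parts p0 cur with
  | nil => simp
  | cons r rs ih =>
    rw [List.flatMap_cons, List.foldl_append]
    rw [scan_group r (grpOf works r) parts p0 cur (h0 r List.mem_cons_self)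
      (hne r List.mem_cons_self)]
    rw [ih (List.Pairwise.sublist (List.sublist_cons_self r rs) hpw)
      (fun x hx => hne x (List.mem_cons_of_mem _ hx)) _ _ _
      (fun x hx hsome => (List.rel_of_pairwise_cons hpw hx) (Option.some.inj hsome))]
    simp [pvFinish, emitOf]

lemma B_eq_parts (works : List (List (String × String))) :
    build_provenance_string_alt works =
      PySem.Str.join "; " ((sortedRefsOf works).map (emitOf works)) := by
  have hc : works.foldl pvCollect (PySem.Set.empty, []) =
      (PySem.Set.ofList (pairsOf works), PySem.Set.ofList (pairsOf works)) := by
    rw [PySem.Set.ofList_eq_foldl]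
    exact B_collect works PySem.Set.empty
  have hpw : (sortedRefsOf works).Pairwise (fun a b : String => a ≠ b) :=
    (PySem.List.sorted_ofList_pairwise_lt _).imp (fun h => ne_of_lt h)
  have hscan := scan_groups works (sortedRefsOf works) hpw
    (fun r hr => grp_ne_nil works r (by
      have := (PySem.List.mem_sorted _ _ _ r).1 hr
      rwa [PySem.Set.mem_ofList] at this))
    [] none [] (fun r _ => by simp)
  unfold build_provenance_string_alt
  rw [hc]
  show PySem.Str.join "; " (pvFinish (List.foldl pvScanStep ([], none, [])
    (PySem.List.sorted (PySem.Set.ofList (pairsOf works)) pvBigKey false))) = _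
  rw [sort_flat works, hscan]
  rfl

-- ===== VERDICT (by name: the statement is the Claim_ definition above) =====
theorem build_provenance_string_spec : Claim_equal_build_provenance_string := by
  intro works _hdom hpre
  unfold Spec_build_provenance_string
  rw [A_eq_parts, B_eq_parts]
  by_cases h : refsOf works = []
  · simp only [h, if_pos]
    have : sortedRefsOf works = [] := by
      unfold sortedRefsOf
      rw [PySem.List.sorted_eq_nil_iff]
      have : refsOf works ⊆ [] := by simp [h]
      rcases hempty : PySem.Set.ofList (refsOf works) with _ | ⟨x, xs⟩
      · rfl
      · exfalso
        have hx : x ∈ PySem.Set.ofList (refsOf works) := by rw [hempty]; exact List.mem_cons_self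
        rw [PySem.Set.mem_ofList] at hx
        simp [h] at hx
    simp [this, PySem.Str.join]
  · rw [if_neg h]
    congr 1
    exact (List.map_congr_left (fun r hr => by
      exact emit_eq_partA works hpre r (by
        have := (PySem.List.mem_sorted _ _ _ r).1 hr
        rwa [PySem.Set.mem_ofList] at this))).symm
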